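-- pv_equiv track=rewrite | github.com/MatisseAD/lazaristes | chapitre6.py | grenouille_correction
-- ===== SOURCE A (Python) =====
-- def appartient(t,k):
--     for x in t:
--         if x==k:
--             return True
--     return False
--
-- def grenouille_correction(m,t):
--     lp=[]
--     i=0
--     cpt=0
--     n=len(t)
--     while cpt != m and i < n:
--         if not appartient(lp, t[i]):
--             cpt += 1
--             lp.append(t[i])
--         i += 1
--     return i-1
-- ===== SOURCE B (Python) =====
-- # B: build the table of first-seen indices in one pass, then answer by lookup.
-- def grenouille_correction(m, t):
--     seen = set()
--     firsts = []
--     for i, x in enumerate(t):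
--         if x not in seen:
--             seen.add(x)
--             firsts.append(i)
--     if m == 0:
--         return -1
--     if 1 <= m <= len(firsts):
--         return firsts[m - 1]
--     return len(t) - 1
-- ===== Notes on version B (the rewrite author's own statement) =====
-- stated objective: alternative
-- what changed: Replaces A's interleaved scan-and-stop loop (tracking lp/cpt/i with an O(distinct) inner membership scan) by one pass that builds the list of first-seen indices with a set, followed by a constant-time lookup.
import Mathlib
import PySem

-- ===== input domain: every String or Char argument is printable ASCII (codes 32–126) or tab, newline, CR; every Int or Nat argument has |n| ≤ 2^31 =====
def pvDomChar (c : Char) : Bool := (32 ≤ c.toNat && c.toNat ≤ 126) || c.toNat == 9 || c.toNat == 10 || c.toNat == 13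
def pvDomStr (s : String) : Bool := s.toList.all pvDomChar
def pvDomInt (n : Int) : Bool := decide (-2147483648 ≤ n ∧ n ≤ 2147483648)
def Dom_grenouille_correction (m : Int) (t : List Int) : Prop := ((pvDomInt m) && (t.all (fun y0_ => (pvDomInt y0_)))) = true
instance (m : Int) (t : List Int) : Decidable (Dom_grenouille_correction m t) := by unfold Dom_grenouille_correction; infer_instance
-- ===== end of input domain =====

-- B replaces A's scan-and-stop loop by one pass building the first-seen-index table plus a lookup (alternative decomposition, same result).

-- ===== PORT A =====
def appartient (t : List Int) (k : Int) : Bool :=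
  match t with
  | [] => false
  | x :: xs => if x == k then true else appartient xs k

-- the while loop: state (lp, cpt, i), scanning the remaining suffix of t (i < n ↔ suffix nonempty)
def grenLoopA (m : Int) (lp : List Int) (cpt i : Int) (rest : List Int) : Int :=
  if cpt = m then i - 1
  else
    match rest with
    | [] => i - 1
    | x :: xs =>
      if ¬ appartient lp x then grenLoopA m (lp ++ [x]) (cpt + 1) (i + 1) xs
      else grenLoopA m lp cpt (i + 1) xs

def grenouille_correction (m : Int) (t : List Int) : Int :=
  grenLoopA m [] 0 0 t

-- ===== PORT B =====
-- the for loop: append i to firsts whenever t[i] is not yet in seen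
def buildFirsts (seen : PySem.Set Int) (i : Int) (rest : List Int) : List Int :=
  match rest with
  | [] => []
  | x :: xs =>
    if PySem.Set.contains seen x then buildFirsts seen (i + 1) xs
    else i :: buildFirsts (PySem.Set.add seen x) (i + 1) xs

def grenouille_correction_alt (m : Int) (t : List Int) : Int :=
  let firsts := buildFirsts PySem.Set.empty 0 t
  if m = 0 then -1
  else if 1 ≤ m ∧ m ≤ firsts.length then firsts.getD (m - 1).toNat 0
  else t.length - 1

-- ===== PRECONDITION & SPEC =====
def Spec_grenouille_correction (m : Int) (t : List Int) (out : Int) : Prop := out = grenouille_correction_alt m t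
instance (m : Int) (t : List Int) (out : Int) : Decidable (Spec_grenouille_correction m t out) := by unfold Spec_grenouille_correction; infer_instance

-- ===== CLAIM (what is proved, stated in full; the proofs are below) =====
def Claim_equal_grenouille_correction : Prop := ∀ (m : Int) (t : List Int), Dom_grenouille_correction m t → Spec_grenouille_correction m t (grenouille_correction m t)

-- ===== LEMMAS AND PROOFS =====

theorem appartient_iff (lp : List Int) (y : Int) : appartient lp y = true ↔ y ∈ lp := by
  induction lp with
  | nil => simp [appartient]
  | cons a l ih =>
    simp only [appartient, List.mem_cons]
    by_cases h : a = y
    · subst h; simp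
    · have hb : (a == y) = false := by simp [h]
      rw [hb]
      simp only [Bool.false_eq_true, if_false, ih]
      constructor
      · exact Or.inr
      · rintro (rfl | hy)
        · exact absurd rfl h
        · exact hy

-- main invariant: with matching seen/lp membership and cpt ≠ m, the loop's result
-- is the (m-cpt)-th entry of the first-seen table of the suffix, else i + |rest| - 1
theorem grenLoopA_eq (m : Int) (rest : List Int) :
    ∀ (lp : List Int) (seen : PySem.Set Int) (cpt i : Int),
    (∀ y, y ∈ lp ↔ y ∈ seen) → cpt ≠ m →
    grenLoopA m lp cpt i rest =
      (if 1 ≤ m - cpt ∧ m - cpt ≤ ((buildFirsts seen i rest).length : Int)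
       then (buildFirsts seen i rest).getD (m - cpt - 1).toNat 0
       else i + rest.length - 1) := by
  induction rest with
  | nil =>
    intro lp seen cpt i hmem hcm
    simp only [grenLoopA, buildFirsts, List.length_nil, Nat.cast_zero, if_neg hcm]
    rw [if_neg (by omega)]
    omega
  | cons x xs ih =>
    intro lp seen cpt i hmem hcm
    have hcon : PySem.Set.contains seen x = appartient lp x := by
      rw [Bool.eq_iff_iff, PySem.Set.contains_iff, appartient_iff]
      exact (hmem x).symm
    simp only [grenLoopA, buildFirsts, if_neg hcm, hcon]
    by_cases hap : appartient lp x = true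
    · -- duplicate element: both sides skip it
      rw [if_neg (fun h => h hap), if_pos hap]
      rw [ih lp seen cpt (i + 1) hmem hcm]
      split_ifs with h
      · rfl
      · simp only [List.length_cons]; push_cast; ring
    · -- new element
      rw [if_pos hap, if_neg hap]
      by_cases hstop : cpt + 1 = m
      · -- the loop stops right after consuming x: result is index i, head of the table
        have hA : grenLoopA m (lp ++ [x]) (cpt + 1) (i + 1) xs = i + 1 - 1 := by
          rw [grenLoopA.eq_def, if_pos hstop]
        rw [hA, if_pos (⟨by omega, by simp only [List.length_cons]; push_cast; omega⟩ :
              1 ≤ m - cpt ∧ m - cpt ≤ (((i :: buildFirsts (PySem.Set.add seen x) (i + 1) xs).length : Nat) : Int))]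
        have h0 : (m - cpt - 1).toNat = 0 := by omega
        rw [h0, List.getD_cons_zero]
        omega
      · have hmem' : ∀ y, y ∈ lp ++ [x] ↔ y ∈ PySem.Set.add seen x := by
          intro y
          rw [PySem.Set.mem_add]
          simp [hmem y]
        rw [ih (lp ++ [x]) (PySem.Set.add seen x) (cpt + 1) (i + 1) hmem' hstop]
        set F := buildFirsts (PySem.Set.add seen x) (i + 1) xs with hF
        by_cases hin : 1 ≤ m - (cpt + 1) ∧ m - (cpt + 1) ≤ (F.length : Int)
        · rw [if_pos hin, if_pos (⟨by omega, by simp only [List.length_cons]; push_cast; omega⟩ :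
                1 ≤ m - cpt ∧ m - cpt ≤ (((i :: F).length : Nat) : Int))]
          have ht : (m - cpt - 1).toNat = (m - (cpt + 1) - 1).toNat + 1 := by omega
          rw [ht, List.getD_cons_succ]
        · rw [if_neg hin, if_neg (show ¬(1 ≤ m - cpt ∧ m - cpt ≤ (((i :: F).length : Nat) : Int)) by
                simp only [List.length_cons]; push_cast; omega)]
          simp only [List.length_cons]; push_cast; ring

-- ===== VERDICT (by name: the statement is the Claim_ definition above) =====
theorem grenouille_correction_spec : Claim_equal_grenouille_correction := by
  unfold Claim_equal_grenouille_correction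
  intro m t _
  unfold Spec_grenouille_correction grenouille_correction grenouille_correction_alt
  by_cases hm : m = 0
  · subst hm
    rw [grenLoopA.eq_def, if_pos rfl]
    simp
  · rw [grenLoopA_eq m t [] PySem.Set.empty 0 0 (by simp [PySem.Set.empty]) (by omega)]
    simp only [if_neg hm, sub_zero, zero_add]
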